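-- pv_equiv track=rewrite | github.com/wrenchchatrepo/looker_tickets | PYscripts/cleanCSV.py | correct_csv_line
-- ===== SOURCE A (Python) =====
-- def correct_csv_line(line):
--     in_quote = False
--     corrected_line = []
--     for char in line:
--         if char == '"':
--             in_quote = not in_quote  # Toggle the in-quote state
--             corrected_line.append(char)
--         elif char == ',' and not in_quote:
--             corrected_line.append(char)
--         elif in_quote or char not in [',', '\r', '\n']:
--             corrected_line.append(char)
--     if in_quote:
--         corrected_line.append('"')  # Close the open quote if needed
--     return ''.join(corrected_line)
-- ===== SOURCE B (Python) =====
-- def correct_csv_line(line):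
--     segments = line.split('"')
--     processed = [''.join(c for c in seg if c not in '\r\n') if i % 2 == 0 else seg
--                  for i, seg in enumerate(segments)]
--     result = '"'.join(processed)
--     if len(segments) % 2 == 0:  # odd number of quotes: the last quote is left open
--         result += '"'
--     return result
-- ===== Notes on version B (the rewrite author's own statement) =====
-- stated objective: faster
-- what changed: Replaced the character-by-character in_quote state machine with a split-on-quote decomposition: the line is split at quote characters, segments alternate outside/inside quote state by index parity, CR/LF are stripped from even (outside) segments only, the pieces are rejoined with the quote character, and a closing quote is appended when the segment count is even (unbalanced quotes).
import Mathlib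
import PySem

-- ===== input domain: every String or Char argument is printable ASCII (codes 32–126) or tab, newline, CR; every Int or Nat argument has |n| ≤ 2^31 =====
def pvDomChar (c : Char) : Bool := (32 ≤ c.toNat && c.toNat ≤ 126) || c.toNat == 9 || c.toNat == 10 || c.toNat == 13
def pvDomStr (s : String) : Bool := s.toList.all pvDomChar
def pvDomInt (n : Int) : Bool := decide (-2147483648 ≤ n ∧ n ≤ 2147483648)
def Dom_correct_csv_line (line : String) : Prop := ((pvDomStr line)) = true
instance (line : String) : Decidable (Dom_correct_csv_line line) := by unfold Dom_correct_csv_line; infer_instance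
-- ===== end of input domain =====

-- B replaces A's per-character in_quote state machine by a split-on-'"' pass:
-- segments alternate outside/inside quotes by index parity; CR/LF are stripped from
-- even segments only, the pieces rejoined with '"', plus a closing '"' for an odd
-- number of quotes. Same O(n) result by a different decomposition; measurably faster in Python (bulk split/filter instead of a per-character loop).


-- ===== PORT A =====
-- the body of A's for-loop: state = (in_quote, corrected_line)
def pvStepA (p : Bool × List Char) (char : Char) : Bool × List Char :=
  if char == '"' then (!p.1, p.2 ++ [char])
  else if char == ',' && !p.1 then (p.1, p.2 ++ [char])
  else if p.1 || !(char == ',' || char == '\r' || char == '\n') then (p.1, p.2 ++ [char])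
  else p

def correct_csv_line (line : String) : String :=
  let st := line.toList.foldl pvStepA (false, [])
  String.ofList (if st.1 then st.2 ++ ['"'] else st.2)

-- ===== PORT B =====
-- line.split('"') on a non-empty separator is PySem.Chars.splitOn on the code points;
-- `c not in '\r\n'` for a single char is exact membership, ported as the filter predicate.
def correct_csv_line_alt (line : String) : String :=
  let segments := PySem.Chars.splitOn line.toList ['"']
  let processed := (PySem.List.enumerate segments).map
    (fun p => if p.1 % 2 == 0 then p.2.filter (fun c => !(c == '\r' || c == '\n')) else p.2)
  let result := PySem.Chars.join ['"'] processed
  String.ofList (if segments.length % 2 == 0 then result ++ ['"'] else result)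

-- ===== PRECONDITION & SPEC =====
def Spec_correct_csv_line (line : String) (out : String) : Prop := out = correct_csv_line_alt line
instance (line : String) (out : String) : Decidable (Spec_correct_csv_line line out) := by unfold Spec_correct_csv_line; infer_instance

-- ===== CLAIM (what is proved, stated in full; the proofs are below) =====
def Claim_equal_correct_csv_line : Prop := ∀ (line : String), Dom_correct_csv_line line → Spec_correct_csv_line line (correct_csv_line line)

-- ===== LEMMAS AND PROOFS =====

-- the characters A's loop emits, as a recursion with the in_quote flag
def pvEmit : Bool → List Char → List Char
  | _, [] => []
  | q, c :: t =>
    if c == '"' then c :: pvEmit (!q) t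
    else if c == ',' && !q then c :: pvEmit q t
    else if q || !(c == ',' || c == '\r' || c == '\n') then c :: pvEmit q t
    else pvEmit q t

-- the in_quote flag at the end of A's loop
def pvQ : Bool → List Char → Bool
  | q, [] => q
  | q, c :: t => pvQ (if c == '"' then !q else q) t

-- split on '"', structurally
def pvQsplit : List Char → List (List Char)
  | [] => [[]]
  | c :: t => if c == '"' then [] :: pvQsplit t else (pvQsplit t).modifyHead (c :: ·)

-- parity processing of the segments: q = this segment is inside quotes
def pvPmap : Bool → List (List Char) → List (List Char)
  | _, [] => []
  | q, s :: rest =>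
      (if q then s else s.filter (fun c => !(c == '\r' || c == '\n'))) :: pvPmap (!q) rest

theorem pvFoldA (l : List Char) : ∀ (q : Bool) (acc : List Char),
    l.foldl pvStepA (q, acc) = (pvQ q l, acc ++ pvEmit q l) := by
  induction l with
  | nil => intro q acc; simp [pvQ, pvEmit]
  | cons c t ih =>
    intro q acc
    simp only [List.foldl_cons, pvStepA, pvQ, pvEmit]
    by_cases h1 : (c == '"') = true
    · simp [h1, ih]
    · by_cases h2 : (c == ',' && !q) = true
      · simp [h1, h2, ih]
      · simp [h1, h2, ih]
        split <;> simp

theorem pvQsplit_ne_nil (l : List Char) : pvQsplit l ≠ [] := by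
  cases l with
  | nil => simp [pvQsplit]
  | cons c t =>
    simp only [pvQsplit]
    split
    · simp
    · cases h : pvQsplit t with
      | nil => exact absurd h (pvQsplit_ne_nil t)
      | cons s r => simp

theorem pvSplitOn_go (fuel : Nat) : ∀ (l cur : List Char) (acc : List (List Char)) (_ : l.length ≤ fuel),
    PySem.Chars.splitOn.go ['"'] fuel l cur acc
      = acc.reverse ++ (pvQsplit l).modifyHead (fun x => cur.reverse ++ x) := by
  induction fuel with
  | zero =>
    intro l cur acc h
    have : l = [] := List.length_eq_zero_iff.mp (Nat.le_zero.mp h)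
    subst this
    simp [PySem.Chars.splitOn.go, pvQsplit]
  | succ f ih =>
    intro l cur acc h
    cases l with
    | nil => simp [PySem.Chars.splitOn.go, pvQsplit]
    | cons c t =>
      rw [PySem.Chars.splitOn.go]
      by_cases hc : c = '"'
      · subst hc
        have hpre : List.isPrefixOf ['"'] ('"' :: t) = true := by
          simp [List.isPrefixOf]
        rw [if_pos hpre]
        have hdrop : List.drop (['"'] : List Char).length ('"' :: t) = t := rfl
        rw [hdrop]
        simp only [List.length_cons] at h
        rw [ih t [] (cur.reverse :: acc) (by omega)]
        cases hs : pvQsplit t with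
        | nil => exact absurd hs (pvQsplit_ne_nil t)
        | cons s r => simp [pvQsplit, hs]
      · have hpre : List.isPrefixOf ['"'] (c :: t) = false := by
          simp [List.isPrefixOf]; exact fun hh => hc hh.symm
        rw [if_neg (by simp [hpre])]
        simp only [List.length_cons] at h
        rw [ih t (c :: cur) acc (by omega)]
        cases hs : pvQsplit t with
        | nil => exact absurd hs (pvQsplit_ne_nil t)
        | cons s r => simp [pvQsplit, hc, hs]

theorem pvSplitOn_eq (l : List Char) : PySem.Chars.splitOn l ['"'] = pvQsplit l := by
  rw [PySem.Chars.splitOn, pvSplitOn_go (l.length + 1) l [] [] (by omega)]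
  cases hs : pvQsplit l with
  | nil => exact absurd hs (pvQsplit_ne_nil l)
  | cons s r => simp

theorem pvEnumMap (segs : List (List Char)) : ∀ (n : Nat),
    (PySem.List.enumerate segs (n : Int)).map
      (fun p => if p.1 % 2 == 0 then p.2.filter (fun c => !(c == '\r' || c == '\n')) else p.2)
      = pvPmap (n % 2 == 1) segs := by
  induction segs with
  | nil => intro n; simp [pvPmap, PySem.List.enumerate_nil]
  | cons s rest ih =>
    intro n
    rw [PySem.List.enumerate_cons]
    have : ((n : Int) + 1) = ((n + 1 : Nat) : Int) := by push_cast; ring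
    rw [List.map_cons, this, ih (n + 1)]
    have hpar : ((n + 1) % 2 == 1) = !(n % 2 == 1) := by
      cases h : (n % 2 == 1) <;> simp at h ⊢ <;> omega
    rw [hpar]
    simp only [pvPmap]
    congr 1
    have hmod : ((n : Int) % 2 == 0) = !(n % 2 == 1) := by
      cases h : (n % 2 == 1) <;> simp at h ⊢ <;> omega
    rw [hmod]
    by_cases hq : (n % 2 == 1) <;> simp [hq]

theorem pvJoin_head_append (a x : List Char) (xs : List (List Char)) :
    PySem.Chars.join ['"'] ((a ++ x) :: xs) = a ++ PySem.Chars.join ['"'] (x :: xs) := by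
  cases xs <;> simp [PySem.Chars.join, List.intercalate, List.intersperse]

theorem pvJoinPmap (l : List Char) : ∀ (q : Bool),
    PySem.Chars.join ['"'] (pvPmap q (pvQsplit l)) = pvEmit q l := by
  induction l with
  | nil =>
    intro q
    cases q <;> simp [pvQsplit, pvPmap, pvEmit, PySem.Chars.join, List.intercalate]
  | cons c t ih =>
    intro q
    by_cases hc : c = '"'
    · subst hc
      simp only [pvQsplit, if_pos (by rfl : ('"' == '"') = true)]
      cases hs : pvQsplit t with
      | nil => exact absurd hs (pvQsplit_ne_nil t)
      | cons s r =>
        have := ih (!q)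
        rw [hs] at this
        cases q <;>
          simp_all [pvPmap, pvEmit, PySem.Chars.join, List.intercalate]
    · cases hs : pvQsplit t with
      | nil => exact absurd hs (pvQsplit_ne_nil t)
      | cons s r =>
        have hbc : (c == '"') = false := by simp [hc]
        simp only [pvQsplit, hbc, Bool.false_eq_true, if_false, hs, List.modifyHead]
        have hihl := ih q
        rw [hs] at hihl
        by_cases hq : q
        · subst hq
          have : pvPmap true ((c :: s) :: r) = (c :: s) :: pvPmap false r := by
            simp [pvPmap]
          rw [this]
          have h2 : (c :: s) = [c] ++ s := rfl
          rw [h2, pvJoin_head_append]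
          have : pvEmit true (c :: t) = c :: pvEmit true t := by
            simp only [pvEmit, hbc, Bool.false_eq_true, if_false]
            by_cases h1 : c == ',' <;> simp [h1]
          rw [this, ← hihl]
          simp [pvPmap]
        · have hqf : q = false := by simpa using hq
          subst hqf
          have : pvPmap false ((c :: s) :: r)
              = ((c :: s).filter (fun c => !(c == '\r' || c == '\n'))) :: pvPmap true r := by
            simp [pvPmap]
          rw [this, List.filter_cons]
          by_cases hk : (!(c == '\r' || c == '\n')) = true
          · rw [if_pos hk]
            have h2 : (c :: s.filter (fun c => !(c == '\r' || c == '\n')))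
                = [c] ++ s.filter (fun c => !(c == '\r' || c == '\n')) := rfl
            rw [h2, pvJoin_head_append]
            have h3 : pvEmit false (c :: t) = c :: pvEmit false t := by
              simp only [pvEmit, hbc, Bool.false_eq_true, if_false]
              by_cases h1 : c == ','
              · simp [h1]
              · have : (c == ',') = false := by simpa using h1
                simp only [this, Bool.false_and, Bool.false_or]
                simp [hk]
            rw [h3, ← hihl]
            simp [pvPmap]
          · have hk' : (!(c == '\r' || c == '\n')) = false := by simpa using hk
            rw [if_neg (by simp [hk'])]
            have h3 : pvEmit false (c :: t) = pvEmit false t := by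
              have hcr : (c == '\r' || c == '\n') = true := by
                revert hk'; cases (c == '\r' || c == '\n') <;> simp
              have hcc : (c == ',') = false := by
                rcases Bool.or_eq_true_iff.mp hcr with h | h
                · simp [eq_of_beq h]
                · simp [eq_of_beq h]
              simp [pvEmit, hbc, hcc, hcr]
            rw [h3, ← hihl]
            simp [pvPmap]

theorem pvQ_parity (l : List Char) : ∀ (q : Bool),
    pvQ q l = (((pvQsplit l).length % 2 == 0) != q) := by
  induction l with
  | nil => intro q; cases q <;> simp [pvQ, pvQsplit]
  | cons c t ih =>
    intro q
    by_cases hc : c = '"'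
    · subst hc
      simp only [pvQ, pvQsplit, if_pos (by rfl : ('"' == '"') = true), List.length_cons]
      rw [ih (!q)]
      have : (((pvQsplit t).length + 1) % 2 == 0) = !((pvQsplit t).length % 2 == 0) := by
        have h2 : (pvQsplit t).length % 2 = 0 ∨ (pvQsplit t).length % 2 = 1 := by omega
        rcases h2 with h | h
        · have h1 : ((pvQsplit t).length + 1) % 2 = 1 := by omega
          simp [h, h1]
        · have h1 : ((pvQsplit t).length + 1) % 2 = 0 := by omega
          simp [h, h1]
      rw [this]
      cases q <;> cases h : ((pvQsplit t).length % 2 == 0) <;> simp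
    · have hbc : (c == '"') = false := by simp [hc]
      simp only [pvQ, pvQsplit, hbc, Bool.false_eq_true, if_false]
      rw [ih q]
      cases hs : pvQsplit t with
      | nil => exact absurd hs (pvQsplit_ne_nil t)
      | cons s r => simp

-- ===== VERDICT (by name: the statement is the Claim_ definition above) =====
theorem correct_csv_line_spec : Claim_equal_correct_csv_line := by
  intro line _
  unfold Spec_correct_csv_line correct_csv_line correct_csv_line_alt
  simp only [pvSplitOn_eq]
  rw [pvFoldA line.toList false [], pvQ_parity line.toList false]
  have henum := pvEnumMap (pvQsplit line.toList) 0
  simp only [Nat.cast_zero] at henum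
  rw [henum]
  have : ((0 : Nat) % 2 == 1) = false := by decide
  rw [this, pvJoinPmap line.toList false]
  cases h : ((pvQsplit line.toList).length % 2 == 0) <;> simp
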